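-- pv_equiv track=rewrite | github.com/id-milan/05_Skripte | 2021-11 PX2DT/plaxisparser/mat_parameters.py | parse_linear_elastic
-- ===== SOURCE A (Python) =====
-- def parse_linear_elastic(tokens):
--     """Parse Linear Elastic material parameters."""
--     params = [
--         "Identification",
--         "SoilModel",
--         "DrainageType",
--         "Colour",
--         "nu",
--         "ERef",
--         "gammaUnsat",
--     ]
--
--     # Initialize an empty dictionary to store parameters and their values
--     parsed_params = {}
--
--     # Iterate over each expected parameter
--     for param in params:
--         # Check if the parameter is in the tokens list (strip quotes for comparison)
--         stripped_tokens = [token.replace('"', "") for token in tokens]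
--         if param in stripped_tokens:
--             # Find the index of the parameter
--             param_index = stripped_tokens.index(param)
--             # Get the value following the parameter, remove quotes, and store in the dictionary
--             param_value = tokens[param_index + 1].replace('"', "")
--             parsed_params[param] = param_value
--
--     return parsed_params
-- ===== SOURCE B (Python) =====
-- def parse_linear_elastic(tokens):
--     """Parse Linear Elastic material parameters (single forward scan)."""
--     names = [
--         "Identification",
--         "SoilModel",
--         "DrainageType",
--         "Colour",
--         "nu",
--         "ERef",
--         "gammaUnsat",
--     ]
--     name_set = set(names)
--     found = {}
--     # one pass over adjacent token pairs; keep the first occurrence of each name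
--     for tok, nxt in zip(tokens, tokens[1:]):
--         s = tok.replace('"', "")
--         if s in name_set and s not in found:
--             found[s] = nxt.replace('"', "")
--     # emit in the canonical parameter order
--     return {p: found[p] for p in names if p in found}
-- ===== Notes on version B (the rewrite author's own statement) =====
-- stated objective: faster
-- what changed: A rescans and re-strips the whole token list once per parameter (membership test + .index per name); B makes a single forward pass over adjacent token pairs keeping the first value seen for each known name, then emits the names in canonical order (measured ~3x faster: one strip+scan instead of seven).
-- crash fix: A raises IndexError when the quote-stripped last token is a parameter name not seen earlier (the matched key is the final token, so tokens[index+1] is out of range); B simply returns the dict of parameters found before it. — e.g. on parse_linear_elastic(["ERef", "500", "nu"]): A raises IndexError, B returns [("ERef", "500")]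
import Mathlib
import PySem

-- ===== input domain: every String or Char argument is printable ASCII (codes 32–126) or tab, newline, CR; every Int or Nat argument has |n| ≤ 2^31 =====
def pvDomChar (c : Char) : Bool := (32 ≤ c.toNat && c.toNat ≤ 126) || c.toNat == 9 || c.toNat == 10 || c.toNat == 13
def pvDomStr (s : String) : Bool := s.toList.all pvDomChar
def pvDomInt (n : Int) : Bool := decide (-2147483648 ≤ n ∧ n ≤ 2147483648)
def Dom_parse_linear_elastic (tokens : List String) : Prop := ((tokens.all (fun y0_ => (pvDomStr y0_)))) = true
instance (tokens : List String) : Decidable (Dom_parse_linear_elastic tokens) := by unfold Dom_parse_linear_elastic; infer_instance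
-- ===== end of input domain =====

-- B replaces A's per-parameter rescan of the token list by one forward pass over adjacent
-- token pairs (first occurrence wins), emitting the found names in canonical order (measured faster).

-- the seven expected parameter names (shared constant of both programs)
def pvParams : List String :=
  ["Identification", "SoilModel", "DrainageType", "Colour", "nu", "ERef", "gammaUnsat"]

-- ===== PORT A =====
def parse_linear_elastic (tokens : List String) : List (String × String) :=
  (pvParams.foldl
    (fun parsed_params param =>
      let stripped_tokens := tokens.map (fun token => PySem.Str.replace token "\"" "")
      if param ∈ stripped_tokens then
        -- `.index` is guarded by the membership test, so `getD 0` is never the default;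
        -- `tokens[param_index + 1]` raises IndexError exactly where Pre_ fails (getD "" unreached inside Pre_)
        let param_index := (PySem.List.index? stripped_tokens param).getD 0
        let param_value := PySem.Str.replace
          ((PySem.List.pyGet? tokens ((param_index : Int) + 1)).getD "") "\"" ""
        PySem.Dict.insert parsed_params param param_value
      else parsed_params)
    PySem.Dict.empty).items

-- ===== PORT B =====
def parse_linear_elastic_alt (tokens : List String) : List (String × String) :=
  let nameSet : PySem.Set String := PySem.Set.ofList pvParams
  let found := (tokens.zip (PySem.List.slice tokens (some 1) none)).foldl
    (fun found pr =>
      let s := PySem.Str.replace pr.1 "\"" ""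
      if PySem.Set.contains nameSet s && !(PySem.Dict.contains found s) then
        PySem.Dict.insert found s (PySem.Str.replace pr.2 "\"" "")
      else found)
    PySem.Dict.empty
  (pvParams.foldl
    (fun d p =>
      match PySem.Dict.get? found p with
      | some v => PySem.Dict.insert d p v
      | none => d)
    PySem.Dict.empty).items

-- ===== PRECONDITION & SPEC =====
-- A raises IndexError when the quote-stripped last token is a parameter name not seen earlier
-- (the matched key is the final token); B returns the dict of parameters found before it.
def Raises_parse_linear_elastic (tokens : List String) : Prop :=
  ∃ t ∈ tokens.getLast?, PySem.Str.replace t "\"" "" ∈ pvParams ∧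
    PySem.Str.replace t "\"" "" ∉ tokens.dropLast.map (fun token => PySem.Str.replace token "\"" "")
instance (tokens : List String) : Decidable (Raises_parse_linear_elastic tokens) := by
  unfold Raises_parse_linear_elastic; infer_instance

-- Pre_ excludes exactly the inputs on which A raises IndexError (see Raises_ above)
def Pre_parse_linear_elastic (tokens : List String) : Prop :=
  ¬ Raises_parse_linear_elastic tokens
instance (tokens : List String) : Decidable (Pre_parse_linear_elastic tokens) := by
  unfold Pre_parse_linear_elastic; infer_instance

def pvWitness_parse_linear_elastic : List String := ["\"nu\"", "0.3", "stop"]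

def pvRaiseWitness_parse_linear_elastic : List String := ["ERef", "500", "nu"]
def pvRaiseWitnessOut_parse_linear_elastic : List (String × String) := [("ERef", "500")]

def Spec_parse_linear_elastic (tokens : List String) (out : List (String × String)) : Prop :=
  out = parse_linear_elastic_alt tokens
instance (tokens : List String) (out : List (String × String)) :
    Decidable (Spec_parse_linear_elastic tokens out) := by
  unfold Spec_parse_linear_elastic; infer_instance

-- ===== CLAIM (what is proved, stated in full; the proofs are below) =====
def Claim_equal_parse_linear_elastic : Prop :=
  ∀ (tokens : List String), Dom_parse_linear_elastic tokens →
    Pre_parse_linear_elastic tokens →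
    Spec_parse_linear_elastic tokens (parse_linear_elastic tokens)

def Claim_raises_parse_linear_elastic : Prop :=
  (∀ (tokens : List String), Dom_parse_linear_elastic tokens →
    Raises_parse_linear_elastic tokens → ¬ Pre_parse_linear_elastic tokens) ∧
  (Dom_parse_linear_elastic (pvRaiseWitness_parse_linear_elastic) ∧
    Raises_parse_linear_elastic (pvRaiseWitness_parse_linear_elastic) ∧
    parse_linear_elastic_alt (pvRaiseWitness_parse_linear_elastic) = pvRaiseWitnessOut_parse_linear_elastic)

-- ===== LEMMAS AND PROOFS =====

-- quote stripping, as both programs do it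
def pvSt (t : String) : String := PySem.Str.replace t "\"" ""

-- value at the FIRST pair whose stripped left component is p (B's scan, as a recursion)
def pvFV : List (String × String) → String → Option String
  | [], _ => none
  | (t, n) :: rest, p => if pvSt t = p then some (pvSt n) else pvFV rest p

-- A's per-parameter computation, as an Option
def pvAV (tokens : List String) (p : String) : Option String :=
  let stripped := tokens.map pvSt
  if p ∈ stripped then
    some (pvSt ((PySem.List.pyGet? tokens ((((PySem.List.index? stripped p).getD 0 : Nat) : Int) + 1)).getD ""))
  else none

-- B's scan step, closed form
def pvStepB (found : PySem.Dict String String) (pr : String × String) : PySem.Dict String String :=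
  if PySem.Set.contains (PySem.Set.ofList pvParams) (pvSt pr.1) && !(PySem.Dict.contains found (pvSt pr.1)) then
    PySem.Dict.insert found (pvSt pr.1) (pvSt pr.2)
  else found

theorem pvA_eq (tokens : List String) :
    parse_linear_elastic tokens =
      (pvParams.foldl
        (fun d p => match pvAV tokens p with
          | some v => PySem.Dict.insert d p v
          | none => d)
        PySem.Dict.empty).items := by
  unfold parse_linear_elastic
  congr 1
  apply PySem.List.foldl_congr_mem
  intro acc p _
  have hfn : (fun token => PySem.Str.replace token "\"" "") = pvSt := rfl
  simp only [pvAV, hfn]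
  by_cases hm : p ∈ tokens.map pvSt
  · rw [if_pos hm, if_pos hm]; simp [pvSt]
  · rw [if_neg hm, if_neg hm]

theorem pvB_eq (tokens : List String) :
    parse_linear_elastic_alt tokens =
      (pvParams.foldl
        (fun d p =>
          match ((tokens.zip tokens.tail).foldl pvStepB PySem.Dict.empty).get? p with
          | some v => PySem.Dict.insert d p v
          | none => d)
        PySem.Dict.empty).items := by
  unfold parse_linear_elastic_alt pvStepB pvSt
  rw [PySem.List.slice_from_one]

theorem pvScanB_get (l : List (String × String)) (d : PySem.Dict String String) (p : String)
    (hp : p ∈ pvParams) :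
    (l.foldl pvStepB d).get? p = (d.get? p).or (pvFV l p) := by
  induction l generalizing d with
  | nil => simp [pvFV]
  | cons pr rest ih =>
    obtain ⟨t, n⟩ := pr
    rw [List.foldl_cons, ih]
    by_cases h1 : pvSt t = p
    · by_cases h2 : PySem.Dict.contains d p = true
      · obtain ⟨v, hv⟩ : ∃ v, d.get? p = some v := by
          rw [PySem.Dict.contains_eq_isSome_get?] at h2
          exact Option.isSome_iff_exists.mp h2
        simp [pvStepB, pvFV, h1, h2, hv]
      · have hget : d.get? p = none := by
          rw [PySem.Dict.contains_eq_isSome_get?] at h2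
          simpa using h2
        have hmem : PySem.Set.contains (PySem.Set.ofList pvParams) p = true :=
          (PySem.Set.contains_iff _ _).mpr ((PySem.Set.mem_ofList _ _).mpr hp)
        simp [pvStepB, pvFV, h1, h2, hget, hp, PySem.Dict.get?_insert_self]
    · have key : (pvStepB d (t, n)).get? p = d.get? p := by
        unfold pvStepB
        split_ifs with hc
        · exact PySem.Dict.get?_insert_of_ne _ _ (fun hh => h1 hh.symm)
        · rfl
      rw [key]
      simp [pvFV, h1]

theorem pvAV_eq_FV (tokens : List String) (p : String)
    (hpre : ∀ t ∈ tokens.getLast?, pvSt t = p → p ∈ tokens.dropLast.map pvSt) :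
    pvAV tokens p = pvFV (tokens.zip tokens.tail) p := by
  induction tokens with
  | nil => simp [pvAV, pvFV]
  | cons t rest ih =>
    cases rest with
    | nil =>
      by_cases h : pvSt t = p
      · exact absurd (hpre t (by simp) h) (by simp)
      · simp [pvAV, pvFV, List.zip]
        exact fun hc => h hc.symm
    | cons r rs =>
      by_cases h : pvSt t = p
      · have hmm : p ∈ (t :: r :: rs).map pvSt := by simp [h]
        have hidx : PySem.List.index? ((t :: r :: rs).map pvSt) p = some 0 := by
          simp only [List.map_cons, h]
          exact PySem.List.index?_cons_self _ _
        have hg : PySem.List.pyGet? (t :: r :: rs) (((0 : Nat) : Int) + 1) = some r := by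
          have h1 := PySem.List.pyGet?_cons_succ t (r :: rs) 0
          have h2 : PySem.List.pyGet? (r :: rs) ((0 : Nat) : Int) = some r := by
            simp [PySem.List.pyGet?_zero_cons]
          rw [h1, h2]
        simp only [pvAV]
        rw [if_pos hmm, hidx]
        simp only [Option.getD_some]
        rw [hg]
        simp [pvFV, h]
      · have hpre' : ∀ t' ∈ (r :: rs).getLast?, pvSt t' = p → p ∈ (r :: rs).dropLast.map pvSt := by
          intro t' ht' hst
          have hmem := hpre t' (by simpa using ht') hst
          simp only [List.dropLast_cons₂, List.map_cons] at hmem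
          rcases List.mem_cons.mp hmem with h' | h'
          · exact absurd h'.symm h
          · exact h'
        have hrec := ih hpre'
        have hzip : (t :: r :: rs).zip (t :: r :: rs).tail =
            (t, r) :: (r :: rs).zip (r :: rs).tail := by
          simp [List.zip]
        rw [hzip]
        have hfv : pvFV ((t, r) :: (r :: rs).zip (r :: rs).tail) p =
            pvFV ((r :: rs).zip (r :: rs).tail) p := by
          simp [pvFV, h]
        rw [hfv, ← hrec]
        by_cases hm : p ∈ (r :: rs).map pvSt
        · obtain ⟨k, hk⟩ : ∃ k, PySem.List.index? ((r :: rs).map pvSt) p = some k :=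
            Option.isSome_iff_exists.mp ((PySem.List.index?_isSome_iff ((r :: rs).map pvSt) p).mpr hm)
          have hne : pvSt t ≠ p := h
          have hidx : PySem.List.index? ((t :: r :: rs).map pvSt) p = some (k + 1) := by
            simp only [List.map_cons]
            rw [PySem.List.index?_cons_of_ne]
            · simp only [List.map_cons] at hk
              rw [hk]; rfl
            · exact hne
          have hmm : p ∈ (t :: r :: rs).map pvSt := by
            simp only [List.map_cons]
            simp only [List.map_cons] at hm
            exact List.mem_cons_of_mem _ hm
          simp only [pvAV]
          rw [if_pos hmm, if_pos hm, hidx, hk]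
          simp only [Option.getD_some]
          have hg : PySem.List.pyGet? (t :: r :: rs) (((k + 1 : Nat) : Int) + 1) =
              PySem.List.pyGet? (r :: rs) (((k : Nat) : Int) + 1) := by
            have h1 := PySem.List.pyGet?_cons_succ t (r :: rs) (k + 1)
            have h2 : ((k + 1 : Nat) : Int) = ((k : Nat) : Int) + 1 := by push_cast; ring
            rw [← h2]
            exact h1
          rw [hg]
        · have hmm : p ∉ (t :: r :: rs).map pvSt := by
            simp only [List.map_cons, List.mem_cons] at hm ⊢
            rintro (hc | hc)
            · exact h hc.symm
            · exact hm hc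
          simp only [pvAV]
          rw [if_neg hmm, if_neg hm]

-- ===== VERDICT (by name: the statement is the Claim_ definition above) =====
theorem parse_linear_elastic_spec : Claim_equal_parse_linear_elastic := by
  intro tokens _ hpre
  unfold Spec_parse_linear_elastic
  rw [pvA_eq, pvB_eq]
  congr 1
  apply PySem.List.foldl_congr_mem
  intro acc p hp
  have hpre' : ∀ t ∈ tokens.getLast?, pvSt t = p → p ∈ tokens.dropLast.map pvSt := by
    intro t ht hst
    by_contra hc
    have hst' : PySem.Str.replace t "\"" "" = p := hst
    exact hpre ⟨t, ht, by rw [hst']; exact hp, by rw [hst']; exact hc⟩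
  have h1 := pvScanB_get (tokens.zip tokens.tail) PySem.Dict.empty p hp
  rw [PySem.Dict.get?_empty] at h1
  rw [h1, Option.none_or, ← pvAV_eq_FV tokens p hpre']

@[simp] theorem parse_linear_elastic_raises : Claim_raises_parse_linear_elastic := by
  unfold Claim_raises_parse_linear_elastic
  exact ⟨fun tokens _ hr hpre => hpre hr, by decide⟩
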